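-- pv_equiv track=rewrite | github.com/Soolik/rpg-agent | main.py | build_placeholder_sections
-- ===== SOURCE A (Python) =====
-- from typing import Any, Dict, List, Literal, Optional
--
-- ArtifactType = Literal[
--     "gm_brief",
--     "session_report",
--     "player_summary",
--     "pre_session_brief",
--     "session_hooks",
--     "scene_seed",
--     "npc_brief",
--     "twist_pack",
-- ]
--
-- def build_placeholder_sections(artifact_type: ArtifactType, markers: List[str]) -> str:
--     lines: List[str] = []
--     for marker in markers:
--         if lines:
--             lines.append("")
--         if marker.startswith("#"):
--             lines.extend([marker, "", "- Do doprecyzowania."])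
--         else:
--             lines.extend([marker, "Do doprecyzowania."])
--     return "\n".join(lines).strip()
-- ===== SOURCE B (Python) =====
-- from typing import List
--
--
-- def build_placeholder_sections(artifact_type, markers: List[str]) -> str:
--     blocks = [
--         f"{marker}\n\n- Do doprecyzowania." if marker.startswith("#")
--         else f"{marker}\nDo doprecyzowania."
--         for marker in markers
--     ]
--     return "\n\n".join(blocks).strip()
-- ===== Notes on version B (the rewrite author's own statement) =====
-- stated objective: simpler
-- what changed: B builds one self-contained block string per marker and joins the blocks with '\n\n', replacing A's token-by-token line list with its conditional inter-section blank-line append.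
import Mathlib
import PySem

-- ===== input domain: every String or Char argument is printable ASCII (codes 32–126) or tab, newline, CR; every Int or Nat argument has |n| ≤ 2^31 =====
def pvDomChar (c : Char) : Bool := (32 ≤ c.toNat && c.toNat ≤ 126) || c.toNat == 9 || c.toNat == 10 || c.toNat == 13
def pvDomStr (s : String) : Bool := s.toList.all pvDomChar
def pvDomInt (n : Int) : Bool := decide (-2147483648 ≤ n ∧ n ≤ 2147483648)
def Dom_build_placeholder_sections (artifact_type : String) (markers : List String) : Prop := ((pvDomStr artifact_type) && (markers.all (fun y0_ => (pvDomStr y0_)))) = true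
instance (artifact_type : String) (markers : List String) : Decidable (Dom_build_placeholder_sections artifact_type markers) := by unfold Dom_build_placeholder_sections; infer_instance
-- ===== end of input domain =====

-- B builds one block string per marker and joins the blocks with "\n\n" (simpler decomposition); A interleaves lines with a conditional blank-line append.


-- ===== PORT A =====
-- one loop step of A: maybe a blank separator line, then the marker's own lines
def pvStepA (lines : List String) (marker : String) : List String :=
  let lines := if lines.isEmpty then lines else lines ++ [""]
  if PySem.Str.startswith marker "#" then
    lines ++ [marker, "", "- Do doprecyzowania."]
  else
    lines ++ [marker, "Do doprecyzowania."]

def build_placeholder_sections (_artifact_type : String) (markers : List String) : String :=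
  let lines : List String := markers.foldl pvStepA []
  PySem.Str.strip (PySem.Str.join "\n" lines)

-- ===== PORT B =====
-- B: each marker becomes a single self-contained block string (f-string concatenation)
def pvBlock (marker : String) : String :=
  if PySem.Str.startswith marker "#" then
    PySem.Str.join "" [marker, "\n\n- Do doprecyzowania."]
  else
    PySem.Str.join "" [marker, "\nDo doprecyzowania."]

def build_placeholder_sections_alt (_artifact_type : String) (markers : List String) : String :=
  PySem.Str.strip (PySem.Str.join "\n\n" (markers.map pvBlock))

-- ===== PRECONDITION & SPEC =====
def Spec_build_placeholder_sections (artifact_type : String) (markers : List String) (out : String) : Prop := out = build_placeholder_sections_alt artifact_type markers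
instance (artifact_type : String) (markers : List String) (out : String) : Decidable (Spec_build_placeholder_sections artifact_type markers out) := by unfold Spec_build_placeholder_sections; infer_instance

-- ===== CLAIM (what is proved, stated in full; the proofs are below) =====
def Claim_equal_build_placeholder_sections : Prop := ∀ (artifact_type : String) (markers : List String), Dom_build_placeholder_sections artifact_type markers → Spec_build_placeholder_sections artifact_type markers (build_placeholder_sections artifact_type markers)

-- ===== LEMMAS AND PROOFS =====

-- the lines one marker contributes (after the separator)
def pvLinesOf (marker : String) : List String :=
  if PySem.Str.startswith marker "#" then [marker, "", "- Do doprecyzowania."]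
  else [marker, "Do doprecyzowania."]

lemma pvStepA_empty (m : String) : pvStepA [] m = pvLinesOf m := by
  simp [pvStepA, pvLinesOf]

lemma pvStepA_cons (l : String) (ls : List String) (m : String) :
    pvStepA (l :: ls) m = (l :: ls) ++ ([""] ++ pvLinesOf m) := by
  simp [pvStepA, pvLinesOf]; split <;> simp

lemma pvLinesOf_ne_nil (m : String) : pvLinesOf m ≠ [] := by
  unfold pvLinesOf; split <;> simp

-- A's fold from a nonempty accumulator appends separator+lines for each marker
lemma pvFoldA_cons_acc (ms : List String) (l : String) (ls : List String) :
    ms.foldl pvStepA (l :: ls) =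
      (l :: ls) ++ ms.flatMap (fun m => [""] ++ pvLinesOf m) := by
  induction ms generalizing ls with
  | nil => simp
  | cons m ms ih =>
    rw [List.foldl_cons, pvStepA_cons]
    have : (l :: ls) ++ ([""] ++ pvLinesOf m) = l :: (ls ++ ([""] ++ pvLinesOf m)) := by simp
    rw [this, ih]
    simp

-- join over (p::xs) ++ (q::ys) splits around one separator
lemma pvJoin_split (sep : List Char) (p q : List Char) (xs ys : List (List Char)) :
    PySem.Chars.join sep ((p :: xs) ++ (q :: ys)) =
      PySem.Chars.join sep (p :: xs) ++ sep ++ PySem.Chars.join sep (q :: ys) := by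
  induction xs generalizing p with
  | nil => simp [PySem.Chars.join_cons_cons, PySem.Chars.join_singleton]
  | cons x xs ih =>
    simp only [List.cons_append] at *
    rw [PySem.Chars.join_cons_cons, ih x, PySem.Chars.join_cons_cons]
    simp [List.append_assoc]

-- per marker: joining its lines with "\n" gives exactly B's block
lemma pvBlock_chars (m : String) :
    PySem.Chars.join ['\n'] ((pvLinesOf m).map String.toList) = (pvBlock m).toList := by
  unfold pvLinesOf pvBlock
  split <;>
  simp [PySem.Chars.join_cons_cons, PySem.Chars.join_singleton, PySem.Str.toList_join]

lemma pvJoinMain (ms : List String) (m : String) :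
    PySem.Chars.join ['\n']
        ((pvLinesOf m ++ ms.flatMap (fun m => [""] ++ pvLinesOf m)).map String.toList) =
      PySem.Chars.join ['\n', '\n'] ((pvBlock m :: ms.map pvBlock).map String.toList) := by
  induction ms generalizing m with
  | nil => simp [PySem.Chars.join_singleton, pvBlock_chars]
  | cons m2 ms ih =>
    obtain ⟨p, xs, hpx⟩ := List.exists_cons_of_ne_nil
      (fun h => pvLinesOf_ne_nil m (List.map_eq_nil_iff.mp h) : (pvLinesOf m).map String.toList ≠ [])
    obtain ⟨r, rs, hr⟩ := List.exists_cons_of_ne_nil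
      (fun h => pvLinesOf_ne_nil m2 (by
        have := List.append_eq_nil_iff.mp (List.map_eq_nil_iff.mp h)
        exact this.1) : (pvLinesOf m2 ++ ms.flatMap (fun m => [""] ++ pvLinesOf m)).map String.toList ≠ [])
    have hflat : (pvLinesOf m ++ ("" :: (pvLinesOf m2 ++ ms.flatMap (fun m => [""] ++ pvLinesOf m)))).map String.toList
        = (p :: xs) ++ ([] :: r :: rs) := by
      rw [List.map_append]
      simp only [List.map_cons]
      rw [hpx, hr]
      rfl
    calc PySem.Chars.join ['\n'] ((pvLinesOf m ++ (m2 :: ms).flatMap (fun m => [""] ++ pvLinesOf m)).map String.toList)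
        = PySem.Chars.join ['\n'] ((p :: xs) ++ ([] :: r :: rs)) := by
          rw [← hflat]; simp [List.flatMap_cons]
      _ = PySem.Chars.join ['\n'] (p :: xs) ++ ['\n'] ++ ([] ++ ['\n'] ++ PySem.Chars.join ['\n'] (r :: rs)) := by
          rw [pvJoin_split, PySem.Chars.join_cons_cons]
      _ = (pvBlock m).toList ++ ['\n', '\n'] ++ PySem.Chars.join ['\n'] ((pvLinesOf m2 ++ ms.flatMap (fun m => [""] ++ pvLinesOf m)).map String.toList) := by
          rw [← hpx, pvBlock_chars, ← hr]; simp
      _ = (pvBlock m).toList ++ ['\n', '\n'] ++ PySem.Chars.join ['\n', '\n'] ((pvBlock m2 :: ms.map pvBlock).map String.toList) := by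
          rw [ih]
      _ = PySem.Chars.join ['\n', '\n'] ((pvBlock m :: (m2 :: ms).map pvBlock).map String.toList) := by
          simp only [List.map_cons]
          rw [PySem.Chars.join_cons_cons]

lemma pvMain (ms : List String) :
    PySem.Str.join "\n" (ms.foldl pvStepA []) = PySem.Str.join "\n\n" (ms.map pvBlock) := by
  cases ms with
  | nil => rfl
  | cons m ms =>
    have hlines : (m :: ms).foldl pvStepA [] = pvLinesOf m ++ ms.flatMap (fun x => [""] ++ pvLinesOf x) := by
      rw [List.foldl_cons, pvStepA_empty]
      obtain ⟨l, ls, hl⟩ := List.exists_cons_of_ne_nil (pvLinesOf_ne_nil m)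
      rw [hl, pvFoldA_cons_acc]
    rw [hlines]
    apply String.ext
    rw [PySem.Str.toList_join, PySem.Str.toList_join]
    have h1 : ("\n" : String).toList = ['\n'] := rfl
    have h2 : ("\n\n" : String).toList = ['\n', '\n'] := rfl
    rw [h1, h2]
    exact pvJoinMain ms m

-- ===== VERDICT (by name: the statement is the Claim_ definition above) =====
theorem build_placeholder_sections_spec : Claim_equal_build_placeholder_sections := by
  intro a ms _
  show PySem.Str.strip (PySem.Str.join "\n" (ms.foldl pvStepA [])) =
    PySem.Str.strip (PySem.Str.join "\n\n" (ms.map pvBlock))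
  rw [pvMain]
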